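-- pv_equiv track=rewrite | github.com/kashifusmani/interview_prep | careem/questions/separatingStudents/separatingStudents.py | minCommon
-- ===== SOURCE A (Python) =====
-- def minCommon(arr):
--     precomp = precompute(arr)
--     numOnes = arr.count(1)
--
--     index = numOnes-1; count = precomp[index]
--     for i in range(numOnes, len(precomp)):
--         running_diff  =precomp[i] - precomp[i-numOnes]
--         if running_diff > count:
--             count =  running_diff
--             index = i
--     return (index-numOnes+1, index+1)
--
-- def precompute(arr, elem=1):
--     result = []
--     if arr[0] == elem:
--         result.append(1)
--     else:
--         result.append(0)
--     for i in range (1, len(arr)):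
--         if arr[i] == elem:
--             result.append(result[i-1] + 1)
--         else:
--             result.append(result[i-1])
--     return result
-- ===== SOURCE B (Python) =====
-- def minCommon(arr):
--     numOnes = arr.count(1)
--     count = 0
--     for x in arr[:numOnes]:
--         if x == 1:
--             count += 1
--     index = numOnes - 1
--     best = count
--     for i in range(numOnes, len(arr)):
--         count += (1 if arr[i] == 1 else 0) - (1 if arr[i - numOnes] == 1 else 0)
--         if count > best:
--             best = count
--             index = i
--     return (index - numOnes + 1, index + 1)
-- ===== Notes on version B (the rewrite author's own statement) =====
-- stated objective: simpler
-- what changed: B replaces A's precomputed prefix-sum table (an O(n) auxiliary list built by repeated appends and indexed twice per window) with a sliding window of width numOnes maintaining a single scalar running count of ones, keeping the same first-maximum tie-break; dropping the table removes its construction and per-step list indexing.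
-- crash fix: On the empty list A raises IndexError (precompute reads arr[0]) while B returns (0, 0). — e.g. on minCommon([]): A raises IndexError, B returns (0, 0)
import Mathlib
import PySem

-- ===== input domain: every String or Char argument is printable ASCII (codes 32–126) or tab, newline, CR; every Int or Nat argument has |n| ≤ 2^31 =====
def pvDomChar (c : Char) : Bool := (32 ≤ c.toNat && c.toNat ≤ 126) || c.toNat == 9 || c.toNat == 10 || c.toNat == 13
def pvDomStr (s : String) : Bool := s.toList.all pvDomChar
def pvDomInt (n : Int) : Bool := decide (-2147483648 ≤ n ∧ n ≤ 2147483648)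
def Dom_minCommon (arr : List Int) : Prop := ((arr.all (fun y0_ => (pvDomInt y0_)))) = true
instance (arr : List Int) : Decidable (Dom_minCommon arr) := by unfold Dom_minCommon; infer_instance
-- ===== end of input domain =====

-- B replaces A's prefix-sum table with a sliding window keeping one scalar running count of ones
-- (same window, same first-maximum tie-break); equivalence of the return values is proved on nonempty lists.

-- ===== PORT A =====
-- literal port of precompute(arr): builds the prefix-count table by appending; arr[0] is read with
-- pyGetD (Pre_ excludes the empty list, on which the Python raises IndexError)
def pvPrecompute (arr : List Int) : List Int :=
  let result : List Int := if PySem.List.pyGetD arr 0 0 == 1 then [1] else [0]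
  (PySem.List.pyRange 1 arr.length).foldl
    (fun result i =>
      if PySem.List.pyGetD arr i 0 == 1 then
        result ++ [PySem.List.pyGetD result (i - 1) 0 + 1]
      else
        result ++ [PySem.List.pyGetD result (i - 1) 0])
    result

def minCommon (arr : List Int) : Int × Int :=
  let precomp := pvPrecompute arr
  let numOnes : Int := (PySem.List.count arr 1 : Int)
  let s := (PySem.List.pyRange numOnes precomp.length).foldl
    (fun (s : Int × Int) i =>
      let runningDiff := PySem.List.pyGetD precomp i 0 - PySem.List.pyGetD precomp (i - numOnes) 0
      if runningDiff > s.2 then (i, runningDiff) else s)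
    (numOnes - 1, PySem.List.pyGetD precomp (numOnes - 1) 0)
  (s.1 - numOnes + 1, s.1 + 1)

-- ===== PORT B =====
def minCommon_alt (arr : List Int) : Int × Int :=
  let numOnes : Int := (PySem.List.count arr 1 : Int)
  let count0 : Int := (PySem.List.slice arr none (some numOnes)).foldl
    (fun c x => if x == 1 then c + 1 else c) 0
  let s := (PySem.List.pyRange numOnes arr.length).foldl
    (fun (s : Int × Int × Int) i =>
      let c := s.1 + (if PySem.List.pyGetD arr i 0 == 1 then 1 else 0)
                   - (if PySem.List.pyGetD arr (i - numOnes) 0 == 1 then 1 else 0)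
      if c > s.2.1 then (c, c, i) else (c, s.2.1, s.2.2))
    (count0, count0, numOnes - 1)
  (s.2.2 - numOnes + 1, s.2.2 + 1)

-- ===== PRECONDITION & SPEC =====
-- Pre_ excludes exactly the empty list, on which A's precompute raises IndexError at arr[0].
def Pre_minCommon (arr : List Int) : Prop := arr ≠ []
instance (arr : List Int) : Decidable (Pre_minCommon arr) := by unfold Pre_minCommon; infer_instance
def pvWitness_minCommon : List Int := [1, 0, 1]

-- On the empty list A raises IndexError (precompute reads arr[0]) while B returns (0, 0).
def Raises_minCommon (arr : List Int) : Prop := arr = []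
instance (arr : List Int) : Decidable (Raises_minCommon arr) := by unfold Raises_minCommon; infer_instance
def pvRaiseWitness_minCommon : List Int := []
def pvRaiseWitnessOut_minCommon : Int × Int := (0, 0)

def Spec_minCommon (arr : List Int) (out : Int × Int) : Prop := out = minCommon_alt arr
instance (arr : List Int) (out : Int × Int) : Decidable (Spec_minCommon arr out) := by unfold Spec_minCommon; infer_instance

-- ===== CLAIM (what is proved, stated in full; the proofs are below) =====
def Claim_equal_minCommon : Prop := ∀ (arr : List Int), Dom_minCommon arr → Pre_minCommon arr → Spec_minCommon arr (minCommon arr)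
def Claim_raises_minCommon : Prop := (∀ (arr : List Int), Dom_minCommon arr → Raises_minCommon arr → ¬ Pre_minCommon arr) ∧ (Dom_minCommon (pvRaiseWitness_minCommon) ∧ Raises_minCommon (pvRaiseWitness_minCommon) ∧ minCommon_alt (pvRaiseWitness_minCommon) = pvRaiseWitnessOut_minCommon)

-- ===== LEMMAS AND PROOFS =====

-- number of ones among the first k elements, as an Int
def pvOnes (arr : List Int) (k : Nat) : Int := (List.count 1 (arr.take k) : Int)

-- the value of A's precompute table, position j ↦ ones in arr[0..j]
def pvP (arr : List Int) : List Int := (List.range arr.length).map (fun j => pvOnes arr (j + 1))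

-- number of ones in the width-nO window ending just before position a
def pvW (arr : List Int) (nO a : Nat) : Int := pvOnes arr a - pvOnes arr (a - nO)

theorem pvOnes_zero (arr : List Int) : pvOnes arr 0 = 0 := by simp [pvOnes]

theorem getD_map_range_int (f : Nat → Int) (n k : Nat) (h : k < n) :
    ((List.range n).map f).getD k 0 = f k := by
  simp [List.getD_eq_getElem?_getD, List.getElem?_range, h]

theorem pvOnes_succ (arr : List Int) (k : Nat) (h : k < arr.length) :
    pvOnes arr (k + 1) = pvOnes arr k + (if arr[k] == 1 then 1 else 0) := by
  unfold pvOnes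
  rw [List.take_succ, List.getElem?_eq_getElem h]
  simp only [Option.toList_some, List.count_append, List.count_cons, List.count_nil,
    List.count_singleton]
  split_ifs <;> push_cast <;> ring

theorem pvP_length (arr : List Int) : (pvP arr).length = arr.length := by simp [pvP]

theorem pvP_getD (arr : List Int) (a : Nat) (h : a < arr.length) :
    (pvP arr).getD a 0 = pvOnes arr (a + 1) := by
  simp [pvP, List.getD_eq_getElem?_getD, List.getElem?_map, List.getElem?_range, h]

theorem pvW_succ (arr : List Int) (nO a : Nat) (h1 : nO ≤ a) (h2 : a < arr.length) :
    pvW arr nO (a + 1) =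
      pvW arr nO a + (if arr[a]'h2 == 1 then 1 else 0)
        - (if arr[a - nO]'(by omega) == 1 then 1 else 0) := by
  have hsub : a + 1 - nO = (a - nO) + 1 := by omega
  have h3 : a - nO < arr.length := by omega
  simp only [pvW, hsub, pvOnes_succ arr a h2, pvOnes_succ arr (a - nO) h3]
  ring

theorem precompute_eq (arr : List Int) (h : arr ≠ []) : pvPrecompute arr = pvP arr := by
  have hlen : 0 < arr.length := List.length_pos_iff.mpr h
  have init_eq : (if PySem.List.pyGetD arr 0 0 == 1 then ([1] : List Int) else [0])
      = [pvOnes arr 1] := by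
    have h0 : PySem.List.pyGetD arr 0 0 = arr[0]'hlen := by
      have := PySem.List.pyGetD_eq_getElem arr (i := 0) 0 (by omega) (by exact_mod_cast hlen)
      simpa using this
    have h1 : pvOnes arr 1 = (if arr[0]'hlen == 1 then 1 else 0) := by
      have := pvOnes_succ arr 0 hlen
      simpa [pvOnes_zero] using this
    rw [h0, h1]; split_ifs <;> rfl
  have main : ∀ n : Nat, 1 ≤ n → n ≤ arr.length →
      (PySem.List.pyRange 1 (n : Int)).foldl
        (fun result i =>
          if PySem.List.pyGetD arr i 0 == 1 then
            result ++ [PySem.List.pyGetD result (i - 1) 0 + 1]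
          else
            result ++ [PySem.List.pyGetD result (i - 1) 0])
        [pvOnes arr 1]
      = (List.range n).map (fun j => pvOnes arr (j + 1)) := by
    intro n
    induction n with
    | zero => omega
    | succ n ih =>
      intro _ hle
      by_cases hn : n = 0
      · subst hn
        rw [show ((1 : Nat) : Int) = 1 by norm_num, PySem.List.pyRange_one_eq_nil (by omega)]
        simp [List.range_succ]
      · have hn1 : 1 ≤ n := by omega
        have hnlen : n < arr.length := by omega
        have hcast : ((n + 1 : Nat) : Int) = (n : Int) + 1 := by push_cast; ring
        rw [hcast, PySem.List.pyRange_one_succ_right (by exact_mod_cast hn1),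
          List.foldl_append, ih hn1 (by omega)]
        have hget : PySem.List.pyGetD arr (n : Int) 0 = arr[n]'hnlen := by
          have := PySem.List.pyGetD_eq_getElem arr (i := (n : Int)) 0 (by positivity)
            (by exact_mod_cast hnlen)
          simpa using this
        have hres : PySem.List.pyGetD ((List.range n).map (fun j => pvOnes arr (j + 1))) ((n : Int) - 1) 0
            = pvOnes arr n := by
          have hc : ((n : Int) - 1) = ((n - 1 : Nat) : Int) := by omega
          rw [hc, PySem.List.pyGetD_natCast, getD_map_range_int _ n (n - 1) (by omega),
            show (n - 1) + 1 = n by omega]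
        simp only [List.foldl_cons, List.foldl_nil]
        rw [hget, hres, List.range_succ, List.map_append]
        have hsucc := pvOnes_succ arr n hnlen
        split_ifs with hone <;> simp [hsucc, hone]
  unfold pvPrecompute
  rw [init_eq]
  by_cases h1 : arr.length = 1
  · rw [show ((arr.length : Nat) : Int) = 1 by omega, PySem.List.pyRange_one_eq_nil (by omega)]
    simp [pvP, h1, List.range_succ]
  · exact (main arr.length (by omega) le_rfl).trans (by simp [pvP])

-- the two loops, started from matching states, end with the same (best, index)
theorem loop_main (arr : List Int) (nO : Nat) :
    ∀ (m a : Nat), a + m = arr.length → nO ≤ a → ∀ (best idx : Int),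
    (PySem.List.pyRange (a : Int) (arr.length : Int)).foldl
      (fun (s : Int × Int × Int) i =>
        if (s.1 + (if PySem.List.pyGetD arr i 0 == 1 then 1 else 0)
             - (if PySem.List.pyGetD arr (i - (nO : Int)) 0 == 1 then 1 else 0)) > s.2.1 then
          (s.1 + (if PySem.List.pyGetD arr i 0 == 1 then 1 else 0)
             - (if PySem.List.pyGetD arr (i - (nO : Int)) 0 == 1 then 1 else 0),
           s.1 + (if PySem.List.pyGetD arr i 0 == 1 then 1 else 0)
             - (if PySem.List.pyGetD arr (i - (nO : Int)) 0 == 1 then 1 else 0), i)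
        else
          (s.1 + (if PySem.List.pyGetD arr i 0 == 1 then 1 else 0)
             - (if PySem.List.pyGetD arr (i - (nO : Int)) 0 == 1 then 1 else 0), s.2.1, s.2.2))
      (pvW arr nO a, best, idx)
    = (pvW arr nO arr.length,
       ((PySem.List.pyRange (a : Int) (arr.length : Int)).foldl
         (fun (s : Int × Int) i =>
           if PySem.List.pyGetD (pvP arr) i 0 - PySem.List.pyGetD (pvP arr) (i - (nO : Int)) 0 > s.2 then
             (i, PySem.List.pyGetD (pvP arr) i 0 - PySem.List.pyGetD (pvP arr) (i - (nO : Int)) 0)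
           else s)
         (idx, best)).2,
       ((PySem.List.pyRange (a : Int) (arr.length : Int)).foldl
         (fun (s : Int × Int) i =>
           if PySem.List.pyGetD (pvP arr) i 0 - PySem.List.pyGetD (pvP arr) (i - (nO : Int)) 0 > s.2 then
             (i, PySem.List.pyGetD (pvP arr) i 0 - PySem.List.pyGetD (pvP arr) (i - (nO : Int)) 0)
           else s)
         (idx, best)).1) := by
  intro m
  induction m with
  | zero =>
    intro a ha _ best idx
    have : a = arr.length := by omega
    subst this
    rw [PySem.List.pyRange_one_eq_nil (le_refl _)]
    simp
  | succ m ih =>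
    intro a ha hnO best idx
    have halen : a < arr.length := by omega
    have hlt : (a : Int) < (arr.length : Int) := by exact_mod_cast halen
    have hsub : a - nO < arr.length := by omega
    have hcastsub : ((a : Int) - (nO : Int)) = ((a - nO : Nat) : Int) := by omega
    have hgA : PySem.List.pyGetD arr (a : Int) 0 = arr[a]'halen := by
      have := PySem.List.pyGetD_eq_getElem arr (i := (a : Int)) 0 (by positivity)
        (by exact_mod_cast halen)
      simpa using this
    have hgS : PySem.List.pyGetD arr ((a : Int) - (nO : Int)) 0 = arr[a - nO]'hsub := by
      rw [hcastsub, PySem.List.pyGetD_natCast, List.getD_eq_getElem?_getD,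
        List.getElem?_eq_getElem hsub]
      rfl
    have hPa : PySem.List.pyGetD (pvP arr) (a : Int) 0 = pvOnes arr (a + 1) := by
      rw [PySem.List.pyGetD_natCast]
      exact pvP_getD arr a halen
    have hPs : PySem.List.pyGetD (pvP arr) ((a : Int) - (nO : Int)) 0 = pvOnes arr ((a - nO) + 1) := by
      rw [hcastsub, PySem.List.pyGetD_natCast]
      exact pvP_getD arr (a - nO) hsub
    have hdiff : pvOnes arr (a + 1) - pvOnes arr ((a - nO) + 1) = pvW arr nO (a + 1) := by
      simp only [pvW]
      rw [show a + 1 - nO = (a - nO) + 1 by omega]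
    have hstep : pvW arr nO a + (if arr[a]'halen == 1 then 1 else 0)
        - (if arr[a - nO]'hsub == 1 then 1 else 0) = pvW arr nO (a + 1) := by
      rw [pvW_succ arr nO a hnO halen]
    rw [PySem.List.pyRange_one_cons hlt]
    simp only [List.foldl_cons, hgA, hgS, hPa, hPs, hdiff, hstep]
    have hcast1 : (a : Int) + 1 = ((a + 1 : Nat) : Int) := by push_cast; ring
    by_cases hgt : pvW arr nO (a + 1) > best
    · simp only [hgt, if_pos hgt, ite_true]
      rw [hcast1]
      exact ih (a + 1) (by omega) (by omega) (pvW arr nO (a + 1)) (a : Int)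
    · simp only [if_neg hgt]
      rw [hcast1]
      exact ih (a + 1) (by omega) (by omega) best idx

theorem initA (arr : List Int) (h : arr ≠ []) :
    PySem.List.pyGetD (pvP arr) ((List.count 1 arr : Int) - 1) 0
      = pvW arr (List.count 1 arr) (List.count 1 arr) := by
  have hlen : 0 < arr.length := List.length_pos_iff.mpr h
  have hle : List.count 1 arr ≤ arr.length := List.count_le_length
  by_cases h0 : List.count 1 arr = 0
  · have hne : pvP arr ≠ [] := by
      simp [pvP]; omega
    rw [h0]
    norm_num
    rw [PySem.List.pyGetD_neg_one (pvP arr) 0 hne]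
    have hlast : (pvP arr).getLast hne = pvOnes arr arr.length := by
      rw [List.getLast_eq_getElem]
      simp only [pvP, pvP_length]
      rw [List.getElem_map, List.getElem_range]
      congr 1
      simp [pvP]
      omega
    rw [hlast]
    have : pvOnes arr arr.length = (List.count 1 arr : Int) := by
      simp [pvOnes, List.take_length]
    rw [this, h0]
    simp [pvW, pvOnes]
  · have h1 : 1 ≤ List.count 1 arr := by omega
    have hc : ((List.count 1 arr : Nat) : Int) - 1 = ((List.count 1 arr - 1 : Nat) : Int) := by omega
    rw [hc, PySem.List.pyGetD_natCast]
    have hidx : List.count 1 arr - 1 < arr.length := by omega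
    rw [pvP_getD arr _ hidx, show List.count 1 arr - 1 + 1 = List.count 1 arr by omega]
    simp [pvW, pvOnes]

theorem initB (arr : List Int) :
    (PySem.List.slice arr none (some ((List.count 1 arr : Nat) : Int))).foldl
      (fun c x => if x == 1 then c + 1 else c) (0 : Int)
      = pvW arr (List.count 1 arr) (List.count 1 arr) := by
  rw [PySem.List.slice_to_natCast, PySem.List.foldl_beq_add_one]
  simp [pvW, pvOnes]

-- ===== VERDICT (by name: the statement is the Claim_ definition above) =====
theorem minCommon_spec : Claim_equal_minCommon := by
  intro arr _ hpre
  show minCommon arr = minCommon_alt arr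
  simp only [minCommon, minCommon_alt, PySem.List.count_eq]
  rw [precompute_eq arr hpre, pvP_length, initA arr hpre, initB arr]
  have hm := loop_main arr (List.count 1 arr) (arr.length - List.count 1 arr) (List.count 1 arr)
    (by have := List.count_le_length (l := arr) (a := (1 : Int)); omega) le_rfl
    (pvW arr (List.count 1 arr) (List.count 1 arr)) ((List.count 1 arr : Int) - 1)
  exact (congrArg
    (fun p : Int × Int × Int => (p.2.2 - (List.count 1 arr : Int) + 1, p.2.2 + 1)) hm).symm

theorem minCommon_raises : Claim_raises_minCommon := by
  unfold Claim_raises_minCommon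
  exact ⟨by intro arr _ hr; simp [Raises_minCommon] at hr; simp [Pre_minCommon, hr], by decide⟩

-- self-check: the stated raise witness does lie in the raise region and B returns the stated value there
theorem pvRaiseWitness_ok :
    Raises_minCommon pvRaiseWitness_minCommon ∧
      minCommon_alt pvRaiseWitness_minCommon = pvRaiseWitnessOut_minCommon :=
  ⟨minCommon_raises.2.2.1, minCommon_raises.2.2.2⟩
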